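-- pv_equiv track=rewrite | github.com/FarzanRashid/Codewars-solutions | Sum of numbers from 0 to N.py | show_sequence
-- ===== SOURCE A (Python) =====
-- def show_sequence(n):
--     asd = "="
--     num = 0
--     output = "0"
--     if n == 0:
--         return "0=0"
--     elif n < 0:
--         return "{}<0".format(n)
--     else:
--         for i in range(1, n +1):
--             output += "+{}".format((str(i)))
--             num += i
--         return output + " = {}".format(num)
-- ===== SOURCE B (Python) =====
-- def show_sequence(n):
--     if n == 0:
--         return "0=0"
--     elif n < 0:
--         return "{}<0".format(n)
--     else:
--         total = n * (n + 1) // 2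
--         return "+".join(str(i) for i in range(n + 1)) + " = {}".format(total)
-- ===== Notes on version B (the rewrite author's own statement) =====
-- stated objective: idiomatic
-- what changed: Replaces the accumulation loop (incremental string concatenation plus a running sum) by a single '+'.join over range(n+1) and the closed-form sum n*(n+1)//2.
import Mathlib
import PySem

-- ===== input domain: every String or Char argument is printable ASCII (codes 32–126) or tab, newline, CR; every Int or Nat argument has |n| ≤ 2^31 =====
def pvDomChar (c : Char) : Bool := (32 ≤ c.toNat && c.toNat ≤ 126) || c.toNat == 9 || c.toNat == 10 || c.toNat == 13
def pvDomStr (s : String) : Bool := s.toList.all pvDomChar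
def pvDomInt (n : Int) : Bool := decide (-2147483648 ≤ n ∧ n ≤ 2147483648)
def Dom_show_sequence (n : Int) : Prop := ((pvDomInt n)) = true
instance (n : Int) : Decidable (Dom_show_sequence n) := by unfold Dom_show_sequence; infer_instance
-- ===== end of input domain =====

-- B replaces A's accumulation loop (incremental string concatenation plus a running sum) by a
-- single "+".join over range(n+1) and the closed-form sum n*(n+1)//2 (idiomatic).

-- ===== PORT A =====
def show_sequence (n : Int) : String :=
  if n == 0 then "0=0"
  else if n < 0 then PySem.Int.toStr n ++ "<0"
  else
    let st := (PySem.List.pyRange 1 (n + 1) 1).foldl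
      (fun (acc : String × Int) i => (acc.1 ++ "+" ++ PySem.Int.toStr i, acc.2 + i)) ("0", 0)
    st.1 ++ " = " ++ PySem.Int.toStr st.2

-- ===== PORT B =====
def show_sequence_alt (n : Int) : String :=
  if n == 0 then "0=0"
  else if n < 0 then PySem.Int.toStr n ++ "<0"
  else
    let total := PySem.Int.floordiv (n * (n + 1)) 2
    PySem.Str.join "+" ((PySem.List.pyRange 0 (n + 1) 1).map PySem.Int.toStr)
      ++ " = " ++ PySem.Int.toStr total

-- ===== PRECONDITION & SPEC =====
def Spec_show_sequence (n : Int) (out : String) : Prop := out = show_sequence_alt n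
instance (n : Int) (out : String) : Decidable (Spec_show_sequence n out) := by unfold Spec_show_sequence; infer_instance

-- ===== CLAIM (what is proved, stated in full; the proofs are below) =====
def Claim_equal_show_sequence : Prop := ∀ (n : Int), Dom_show_sequence n → Spec_show_sequence n (show_sequence n)

-- ===== LEMMAS AND PROOFS =====

theorem pv_cjoin_snoc (sep x : List Char) (l : List (List Char)) (h : l ≠ []) :
    PySem.Chars.join sep (l ++ [x]) = PySem.Chars.join sep l ++ sep ++ x := by
  induction l with
  | nil => exact absurd rfl h
  | cons a t ih =>
    cases t with
    | nil =>
      rw [List.cons_append, List.nil_append, PySem.Chars.join_cons_cons,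
          PySem.Chars.join_singleton, PySem.Chars.join_singleton]
    | cons b u =>
      simp only [List.cons_append] at ih ⊢
      rw [PySem.Chars.join_cons_cons, PySem.Chars.join_cons_cons, ih (by simp)]
      simp [List.append_assoc]

theorem pv_join_snoc (sep x : String) (l : List String) (h : l ≠ []) :
    PySem.Str.join sep (l ++ [x]) = PySem.Str.join sep l ++ sep ++ x := by
  rw [← String.toList_inj]
  simp only [String.toList_append, PySem.Str.toList_join, List.map_append, List.map]
  exact pv_cjoin_snoc sep.toList x.toList (l.map String.toList) (by simp [h])

-- characterisation of A's loop over range(1, k+1): the string is the "+"-join of range(0, k+1)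
-- and the accumulated sum is the triangular number k*(k+1)/2
theorem pv_loop_char (k : Nat) :
    (PySem.List.pyRange 1 ((k : Int) + 1) 1).foldl
      (fun (acc : String × Int) i => (acc.1 ++ "+" ++ PySem.Int.toStr i, acc.2 + i)) ("0", 0)
    = (PySem.Str.join "+" ((PySem.List.pyRange 0 ((k : Int) + 1) 1).map PySem.Int.toStr),
       ((k : Int) * ((k : Int) + 1)) / 2) := by
  induction k with
  | zero => decide
  | succ m ih =>
    have h1 : ((m + 1 : Nat) : Int) = (m : Int) + 1 := by push_cast; ring
    rw [h1,
        PySem.List.pyRange_one_succ_right (a := 1) (b := (m : Int) + 1) (by omega),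
        PySem.List.pyRange_one_succ_right (a := 0) (b := (m : Int) + 1) (by omega),
        List.foldl_append, ih, List.map_append]
    have hne : ((PySem.List.pyRange 0 ((m : Int) + 1) 1).map PySem.Int.toStr) ≠ [] := by
      have h0 : (0 : Int) ∈ PySem.List.pyRange 0 ((m : Int) + 1) 1 := by
        rw [PySem.List.mem_pyRange_one]; omega
      intro hnil
      rw [List.map_eq_nil_iff] at hnil
      simp [hnil] at h0
    simp only [List.foldl, List.map]
    rw [pv_join_snoc _ _ _ hne]
    refine Prod.ext rfl ?_
    show (m : Int) * ((m : Int) + 1) / 2 + ((m : Int) + 1)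
        = ((m : Int) + 1) * (((m : Int) + 1) + 1) / 2
    have he : (m : Int) * ((m : Int) + 1) = 2 * ((m : Int) * ((m : Int) + 1) / 2) := by
      rcases Int.even_mul_succ_self (m : Int) with ⟨c, hc⟩
      omega
    have hx : ((m : Int) + 1) * (((m : Int) + 1) + 1)
        = (m : Int) * ((m : Int) + 1) + 2 * ((m : Int) + 1) := by ring
    omega

-- ===== VERDICT (by name: the statement is the Claim_ definition above) =====
theorem show_sequence_spec : Claim_equal_show_sequence := by
  intro n _
  unfold Spec_show_sequence show_sequence show_sequence_alt
  by_cases h0 : n = 0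
  · simp [h0]
  · by_cases hneg : n < 0
    · simp [h0, hneg]
    · obtain ⟨k, hk⟩ : ∃ k : Nat, n = (k : Int) := ⟨n.toNat, by omega⟩
      simp only [beq_iff_eq, h0, if_false, hneg]
      subst hk
      rw [pv_loop_char k,
          PySem.Int.floordiv_eq_ediv_of_pos (b := 2) (by omega)]
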